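-- pv_equiv track=rewrite | github.com/ManuelHettich/Advent-of-Code | 2023/Day_11/main.py | count_galaxies
-- ===== SOURCE A (Python) =====
-- def count_galaxies(grid):
--     """
--     Count the number of galaxies in each row and column of the grid.
--
--     Args:
--     grid (list of list of str): Grid representation of the cosmic data.
--
--     Returns:
--     tuple: Two lists containing the count of galaxies in each row and column.
--     """
--     row_galaxy_counts = [0] * len(grid)
--     column_galaxy_counts = [0] * len(grid[0])
--     for row_index, row in enumerate(grid):
--         for column_index, cell in enumerate(row):
--             if cell == "#":
--                 row_galaxy_counts[row_index] += 1
--                 column_galaxy_counts[column_index] += 1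
--     return row_galaxy_counts, column_galaxy_counts
-- ===== SOURCE B (Python) =====
-- def count_galaxies(grid):
--     row_counts = [row.count("#") for row in grid]
--     width = len(grid[0])
--     col_counts = [sum(1 for row in grid if c < len(row) and row[c] == "#")
--                   for c in range(width)]
--     return row_counts, col_counts
-- ===== Notes on version B (the rewrite author's own statement) =====
-- stated objective: simpler
-- what changed: Replaces the fused nested loop that mutates two counter arrays in place with two independent comprehensions: per-row count of '#', and per-column count over the rows.
import Mathlib
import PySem

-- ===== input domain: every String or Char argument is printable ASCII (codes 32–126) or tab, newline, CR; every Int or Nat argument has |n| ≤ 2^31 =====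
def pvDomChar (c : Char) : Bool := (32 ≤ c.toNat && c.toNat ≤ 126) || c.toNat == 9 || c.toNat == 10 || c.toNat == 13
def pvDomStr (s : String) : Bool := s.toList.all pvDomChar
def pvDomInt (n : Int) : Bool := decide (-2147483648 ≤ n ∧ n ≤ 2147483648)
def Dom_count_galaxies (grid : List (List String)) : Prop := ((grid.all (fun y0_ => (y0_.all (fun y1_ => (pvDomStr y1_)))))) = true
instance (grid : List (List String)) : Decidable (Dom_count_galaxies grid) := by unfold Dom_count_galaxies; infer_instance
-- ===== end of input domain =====

-- B is simpler: two independent comprehensions (per-row count, per-column count) instead of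
-- one fused nested loop mutating two counter arrays in place.

-- ===== PORT A =====
-- inner loop: 'for column_index, cell in enumerate(row): if cell == "#": …'
def cgInner (ri : Nat) : Nat → List String → List Int × List Int → List Int × List Int
  | _, [], st => st
  | ci, cell :: rest, (r, c) =>
      cgInner ri (ci + 1) rest
        (if cell = "#" then (r.set ri (r.getD ri 0 + 1), c.set ci (c.getD ci 0 + 1)) else (r, c))

-- outer loop: 'for row_index, row in enumerate(grid): …'
def cgOuter : Nat → List (List String) → List Int × List Int → List Int × List Int
  | _, [], st => st
  | ri, row :: rest, st => cgOuter (ri + 1) rest (cgInner ri 0 row st)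

def count_galaxies (grid : List (List String)) : List Int × List Int :=
  cgOuter 0 grid (List.replicate grid.length (0 : Int), List.replicate grid.headI.length (0 : Int))

-- ===== PORT B =====
def count_galaxies_alt (grid : List (List String)) : List Int × List Int :=
  (grid.map (fun row => (PySem.List.count row "#" : Int)),
   (List.range grid.headI.length).map
     (fun c => (grid.countP (fun row => decide (c < row.length) && decide (row.getD c "" = "#")) : Int)))

-- ===== PRECONDITION & SPEC =====
-- Pre_ excludes exactly the inputs on which A raises IndexError: the empty grid (grid[0]),
-- and a '#' located at a column index ≥ len(grid[0]) (column-counter update out of range).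
def Pre_count_galaxies (grid : List (List String)) : Prop :=
  grid ≠ [] ∧ ∀ row ∈ grid, "#" ∉ row.drop grid.headI.length
instance (grid : List (List String)) : Decidable (Pre_count_galaxies grid) := by
  unfold Pre_count_galaxies; infer_instance

def pvWitness_count_galaxies : List (List String) := [["#", "."], [".", "#"], ["#", "#"]]

def Spec_count_galaxies (grid : List (List String)) (out : List Int × List Int) : Prop :=
  out = count_galaxies_alt grid
instance (grid : List (List String)) (out : List Int × List Int) : Decidable (Spec_count_galaxies grid out) := by
  unfold Spec_count_galaxies; infer_instance

-- ===== CLAIM (what is proved, stated in full; the proofs are below) =====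
def Claim_equal_count_galaxies : Prop := ∀ (grid : List (List String)),
  Dom_count_galaxies grid → Pre_count_galaxies grid →
  Spec_count_galaxies grid (count_galaxies grid)

-- ===== LEMMAS AND PROOFS =====

-- the column-side effect of one row of the inner loop
def cgAddRow : Nat → List String → List Int → List Int
  | _, [], c => c
  | ci, cell :: rest, c =>
      cgAddRow (ci + 1) rest (if cell = "#" then c.set ci (c.getD ci 0 + 1) else c)

-- the per-column contribution of a row at absolute column j, when the row starts at column ci
def cgInd (ci : Nat) (row : List String) (j : Nat) : Int :=
  if ci ≤ j ∧ row.getD (j - ci) "" = "#" then 1 else 0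

theorem getD_set_int (l : List Int) (i j : Nat) (a : Int) :
    (l.set i a).getD j 0 = if i = j ∧ i < l.length then a else l.getD j 0 := by
  by_cases hj : j < l.length
  · rw [List.getD_eq_getElem _ 0 (by simpa using hj), List.getElem_set]
    by_cases hij : i = j
    · subst hij; simp [hj, List.getElem?_eq_getElem hj]
    · simp [hij, List.getElem?_eq_getElem hj]
  · rw [List.getD_eq_default _ 0 (by simpa using hj),
      List.getD_eq_default _ 0 (by omega)]
    have : ¬ (i = j ∧ i < l.length) := by omega
    simp [this]

theorem cgInner_snd (ri : Nat) : ∀ (row : List String) (ci : Nat) (r c : List Int),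
    (cgInner ri ci row (r, c)).2 = cgAddRow ci row c := by
  intro row
  induction row with
  | nil => intro ci r c; rfl
  | cons cell rest ih =>
      intro ci r c
      by_cases h : cell = "#" <;> simp [cgInner, cgAddRow, h, ih]

theorem cgInner_fst (ri : Nat) : ∀ (row : List String) (ci : Nat) (r c : List Int),
    ri < r.length →
    (cgInner ri ci row (r, c)).1 = r.set ri (r.getD ri 0 + (row.count "#" : Int)) := by
  intro row
  induction row with
  | nil =>
      intro ci r c hri
      simp [cgInner, List.getElem?_eq_getElem hri]
  | cons cell rest ih =>
      intro ci r c hri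
      by_cases h : cell = "#"
      · have hlen : ri < (r.set ri (r.getD ri 0 + 1)).length := by simpa using hri
        simp only [cgInner, h, if_true]
        rw [ih (ci + 1) _ _ hlen, getD_set_int, List.set_set,
          if_pos (⟨rfl, hri⟩ : ri = ri ∧ ri < r.length)]
        congr 1
        simp [List.count_cons, h]
        push_cast
        ring
      · simp only [cgInner, h, if_false]
        rw [ih (ci + 1) _ _ hri]
        simp [List.count_cons, h]

theorem cgAddRow_length : ∀ (row : List String) (ci : Nat) (c : List Int),
    (cgAddRow ci row c).length = c.length := by
  intro row
  induction row with
  | nil => intro ci c; rfl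
  | cons cell rest ih =>
      intro ci c
      by_cases h : cell = "#" <;> simp [cgAddRow, h, ih]

theorem cgInd_cons (cell : String) (rest : List String) (ci j : Nat) (hj : ci ≠ j) :
    cgInd ci (cell :: rest) j = cgInd (ci + 1) rest j := by
  unfold cgInd
  by_cases hle : ci + 1 ≤ j
  · have h1 : ci ≤ j := by omega
    have h2 : j - ci = (j - (ci + 1)) + 1 := by omega
    simp [h1, hle, h2]
  · have h3 : ¬ ci ≤ j := by omega
    simp [h3, hle]

theorem cgAddRow_getD : ∀ (row : List String) (ci : Nat) (c : List Int) (j : Nat),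
    j < c.length →
    (∀ p : Nat, c.length ≤ ci + p → row.getD p "" ≠ "#") →
    (cgAddRow ci row c).getD j 0 = c.getD j 0 + cgInd ci row j := by
  intro row
  induction row with
  | nil =>
      intro ci c j h _
      simp [cgAddRow, cgInd]
  | cons cell rest ih =>
      intro ci c j h hP
      by_cases hc : cell = "#"
      · subst hc
        have hci : ci < c.length := by
          by_contra hn
          exact hP 0 (by omega) (by simp)
        have hlen : j < (c.set ci (c.getD ci 0 + 1)).length := by simpa using h
        have hP' : ∀ p : Nat, (c.set ci (c.getD ci 0 + 1)).length ≤ (ci + 1) + p →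
            rest.getD p "" ≠ "#" := by
          intro p hp
          have := hP (p + 1) (by simp at hp; omega)
          simpa using this
        simp only [cgAddRow, eq_self_iff_true, if_true]
        rw [ih (ci + 1) _ j hlen hP', getD_set_int]
        by_cases hij : ci = j
        · subst hij
          have h0 : cgInd (ci + 1) rest ci = 0 := by
            unfold cgInd
            have : ¬ ci + 1 ≤ ci := by omega
            simp [this]
          have h1 : cgInd ci ("#" :: rest) ci = 1 := by
            unfold cgInd; simp
          simp [hci, h0, h1]
        · rw [cgInd_cons _ _ _ _ hij]
          simp [hij]
      · simp only [cgAddRow, if_neg hc]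
        have hP' : ∀ p : Nat, c.length ≤ (ci + 1) + p → rest.getD p "" ≠ "#" := by
          intro p hp
          have := hP (p + 1) (by omega)
          simpa using this
        rw [ih (ci + 1) c j h hP']
        by_cases hij : ci = j
        · subst hij
          have h0 : cgInd (ci + 1) rest ci = 0 := by
            unfold cgInd
            have : ¬ ci + 1 ≤ ci := by omega
            simp [this]
          have h1 : cgInd ci (cell :: rest) ci = 0 := by
            unfold cgInd; simp [hc]
          simp [h0, h1]
        · rw [cgInd_cons _ _ _ _ hij]

theorem cgFold_length : ∀ (rows : List (List String)) (c : List Int),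
    (rows.foldl (fun c row => cgAddRow 0 row c) c).length = c.length := by
  intro rows
  induction rows with
  | nil => intro c; rfl
  | cons row rest ih => intro c; simp [ih, cgAddRow_length]

theorem cgFold_getD : ∀ (rows : List (List String)) (c : List Int) (j : Nat),
    j < c.length →
    (∀ row ∈ rows, ∀ p : Nat, c.length ≤ p → row.getD p "" ≠ "#") →
    (rows.foldl (fun c row => cgAddRow 0 row c) c).getD j 0 =
      c.getD j 0 +
        (rows.countP (fun row => decide (j < row.length) && decide (row.getD j "" = "#")) : Int) := by
  intro rows
  induction rows with
  | nil => intro c j h _; simp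
  | cons row rest ih =>
      intro c j h hP
      have hlen : j < (cgAddRow 0 row c).length := by rw [cgAddRow_length]; exact h
      have hP' : ∀ r ∈ rest, ∀ p : Nat, (cgAddRow 0 row c).length ≤ p → r.getD p "" ≠ "#" := by
        intro r hr p hp
        exact hP r (by simp [hr]) p (by rwa [cgAddRow_length] at hp)
      simp only [List.foldl_cons]
      rw [ih (cgAddRow 0 row c) j hlen hP']
      rw [cgAddRow_getD row 0 c j h (fun p hp => hP row (by simp) p (by omega))]
      have hind : cgInd 0 row j =
          (if (decide (j < row.length) && decide (row.getD j "" = "#")) = true then 1 else 0 : Int) := by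
        unfold cgInd
        by_cases hjl : j < row.length
        · simp [hjl]
        · have hdef : row.getD j "" = "" := List.getD_eq_default row "" (by omega)
          simp [hjl, hdef]
      rw [List.countP_cons, hind]
      by_cases hb : (decide (j < row.length) && decide (row.getD j "" = "#")) = true
      · simp [hb]
        push_cast
        ring
      · simp [hb]
        ring

theorem cgOuter_char : ∀ (rest : List (List String)) (ri : Nat) (r c : List Int),
    r.length = ri + rest.length →
    cgOuter ri rest (r, c) =
      (r.take ri ++ List.zipWith (fun (x : Int) row => x + (row.count "#" : Int)) (r.drop ri) rest,
       rest.foldl (fun c row => cgAddRow 0 row c) c) := by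
  intro rest
  induction rest with
  | nil =>
      intro ri r c hlen
      simp only [List.length_nil, Nat.add_zero] at hlen
      simp [cgOuter, List.take_of_length_le (le_of_eq hlen)]
  | cons row rest ih =>
      intro ri r c hlen
      have hri : ri < r.length := by simp at hlen; omega
      have hstep : cgInner ri 0 row (r, c) =
          (r.set ri (r.getD ri 0 + (row.count "#" : Int)), cgAddRow 0 row c) := by
        exact Prod.ext (cgInner_fst ri row 0 r c hri) (cgInner_snd ri row 0 r c)
      simp only [cgOuter, hstep, List.foldl_cons]
      rw [ih (ri + 1) _ _ (by simp at hlen ⊢; omega)]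
      have hset : r.set ri (r.getD ri 0 + (row.count "#" : Int)) =
          r.take ri ++ (r.getD ri 0 + (row.count "#" : Int)) :: r.drop (ri + 1) := by
        rw [List.set_eq_take_append_cons_drop, if_pos hri]
      simp only [Prod.mk.injEq]
      refine ⟨?_, trivial⟩
      have htk : (r.take ri).length = ri := by simp; omega
      have h1 : (r.take ri).drop (ri + 1) = [] := List.drop_of_length_le (by rw [htk]; omega)
      have h2 : (r.take ri).take (ri + 1) = r.take ri := List.take_of_length_le (by rw [htk]; omega)
      have h3 : ri + 1 - ri = 1 := by omega
      rw [hset, List.take_append, List.drop_append, htk, h1, h2, h3]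
      simp only [List.take_succ_cons, List.take_zero, List.drop_succ_cons, List.drop_zero,
        List.nil_append]
      rw [List.getD_eq_getElem r 0 hri]
      simp only [List.append_assoc, List.cons_append, List.nil_append]
      rw [List.drop_eq_getElem_cons hri]
      simp only [List.zipWith_cons_cons]

theorem zipWith_replicate_zero : ∀ (l : List (List String)),
    List.zipWith (fun (x : Int) row => x + (row.count "#" : Int))
      (List.replicate l.length (0 : Int)) l = l.map (fun row => (row.count "#" : Int)) := by
  intro l
  induction l with
  | nil => rfl
  | cons row rest ih => simp [List.replicate_succ, ih]

-- ===== VERDICT (by name: the statement is the Claim_ definition above) =====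
theorem count_galaxies_spec : Claim_equal_count_galaxies := by
  intro grid _ hpre
  obtain ⟨hne, hdrop⟩ := hpre
  unfold Spec_count_galaxies count_galaxies count_galaxies_alt
  rw [cgOuter_char grid 0 (List.replicate grid.length 0) (List.replicate grid.headI.length 0)
    (by simp)]
  simp only [Prod.mk.injEq]
  constructor
  · simp [zipWith_replicate_zero, PySem.List.count_eq]
  · have hP : ∀ row ∈ grid, ∀ p : Nat,
        (List.replicate grid.headI.length (0 : Int)).length ≤ p → row.getD p "" ≠ "#" := by
      intro row hrow p hp hhash
      simp only [List.length_replicate] at hp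
      have hpl : p < row.length := by
        by_contra hn
        rw [List.getD_eq_default row "" (by omega)] at hhash
        simp at hhash
      apply hdrop row hrow
      rw [List.mem_drop_iff_getElem]
      refine ⟨p - grid.headI.length, by omega, ?_⟩
      rw [← hhash, List.getD_eq_getElem row "" hpl]
      congr 1
      omega
    apply List.ext_getElem
    · simp [cgFold_length]
    · intro j h1 h2
      have hj : j < grid.headI.length := by simpa [cgFold_length] using h1
      rw [← List.getD_eq_getElem _ 0 h1]
      rw [cgFold_getD grid (List.replicate grid.headI.length 0) j (by simpa using hj) hP]
      simp [hj]
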